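-- pv_equiv track=rewrite | github.com/diogo-alves/python-brasil-exercicios | estrutura_sequencial/utils.py | list_as_text
-- ===== SOURCE A (Python) =====
-- def list_as_text(items, last_sep='e'):
--     """
--     Converte um iterável em uma enumeração:
--     >>> list_as_text([])
--     ''
--     >>> list_as_text(['Dona Flor'])
--     'Dona Flor'
--     >>> list_as_text(['Dona Flor', 'Vadinho', 'Teodoro'])
--     'Dona Flor, Vadinho e Teodoro'
--     >>> list_as_text(['Dona Flor', 'Vadinho', 'Teodoro'], last_sep='ou')
--     'Dona Flor, Vadinho ou Teodoro'
--     """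
--     if not items:
--         text = ''
--     elif len(items) == 1:
--         text = str(items[0])
--     else:
--         text = (
--             f'{", ".join(str(item) for item in items[:-1])} '
--             f'{last_sep} {items[-1]}'
--         )
--     return text
-- ===== SOURCE B (Python) =====
-- def list_as_text(items, last_sep='e'):
--     n = len(items)
--     parts = []
--     for i, item in enumerate(items):
--         if i == 0:
--             parts.append(str(item))
--         elif i == n - 1:
--             parts.append(f' {last_sep} {item}')
--         else:
--             parts.append(f', {item}')
--     return ''.join(parts)
-- ===== Notes on version B (the rewrite author's own statement) =====
-- stated objective: alternative
-- what changed: Replaces the slice-join-plus-f-string assembly (items[:-1] joined with ', ', then last_sep and items[-1] appended) by a single enumerate loop that picks the right separator per position and joins the parts once.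
import Mathlib
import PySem

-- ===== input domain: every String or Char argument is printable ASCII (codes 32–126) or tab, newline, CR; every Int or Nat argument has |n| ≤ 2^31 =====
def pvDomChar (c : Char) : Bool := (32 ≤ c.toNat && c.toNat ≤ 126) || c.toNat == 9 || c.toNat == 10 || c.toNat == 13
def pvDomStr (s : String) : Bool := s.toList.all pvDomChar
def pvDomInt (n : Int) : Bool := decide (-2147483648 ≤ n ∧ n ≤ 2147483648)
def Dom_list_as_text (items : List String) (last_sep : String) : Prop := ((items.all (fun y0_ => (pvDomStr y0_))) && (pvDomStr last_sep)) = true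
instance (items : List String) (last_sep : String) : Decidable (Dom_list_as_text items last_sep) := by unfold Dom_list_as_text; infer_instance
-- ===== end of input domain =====

-- B builds the enumeration in one enumerate-loop with a per-position separator instead of
-- A's slice-join-plus-f-string assembly; alternative decomposition, same cost.


-- ===== PORT A =====
-- A: empty → ''; singleton → items[0]; else ', '.join(items[:-1]) + ' ' + last_sep + ' ' + items[-1].
-- (items[0]/items[-1] sit behind the emptiness guards, so the pyGetD defaults never fire.)
def list_as_text (items : List String) (last_sep : String) : String :=
  if items = [] then ""
  else if items.length = 1 then PySem.List.pyGetD items 0 ""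
  else
    PySem.Str.join ", " (PySem.List.slice items none (some (-1))) ++ " " ++ last_sep
      ++ " " ++ PySem.List.pyGetD items (-1) ""

-- ===== PORT B =====
-- B: for i, item in enumerate(items): append item / f' {last_sep} {item}' / f', {item}'; join once.
def list_as_text_alt (items : List String) (last_sep : String) : String :=
  let n : Int := (items.length : Int)
  let parts : List String :=
    (PySem.List.enumerate items 0).foldl
      (fun acc p =>
        if p.1 = 0 then acc ++ [p.2]
        else if p.1 = n - 1 then acc ++ [" " ++ last_sep ++ " " ++ p.2]
        else acc ++ [", " ++ p.2])
      []
  PySem.Str.join "" parts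

-- ===== PRECONDITION & SPEC =====
def Spec_list_as_text (items : List String) (last_sep : String) (out : String) : Prop := out = list_as_text_alt items last_sep
instance (items : List String) (last_sep : String) (out : String) : Decidable (Spec_list_as_text items last_sep out) := by unfold Spec_list_as_text; infer_instance

-- ===== CLAIM (what is proved, stated in full; the proofs are below) =====
def Claim_equal_list_as_text : Prop := ∀ (items : List String) (last_sep : String), Dom_list_as_text items last_sep → Spec_list_as_text items last_sep (list_as_text items last_sep)

-- ===== LEMMAS AND PROOFS =====

theorem join_nil_cons (a : List Char) (l : List (List Char)) :
    PySem.Chars.join [] (a :: l) = a ++ PySem.Chars.join [] l := by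
  cases l with
  | nil => simp [PySem.Chars.join_singleton, PySem.Chars.join_nil]
  | cons q rest => rw [PySem.Chars.join_cons_cons]; simp

theorem join_nil_append_singleton (l : List (List Char)) (t : List Char) :
    PySem.Chars.join [] (l ++ [t]) = PySem.Chars.join [] l ++ t := by
  induction l with
  | nil => simp [PySem.Chars.join_singleton, PySem.Chars.join_nil]
  | cons a l ih => rw [List.cons_append, join_nil_cons, ih, join_nil_cons, List.append_assoc]

theorem join_sep_cons_sep (c m : List Char) (ms : List (List Char)) :
    PySem.Chars.join c ((c ++ m) :: ms) = c ++ PySem.Chars.join c (m :: ms) := by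
  cases ms with
  | nil => simp [PySem.Chars.join_singleton]
  | cons q rest => rw [PySem.Chars.join_cons_cons, PySem.Chars.join_cons_cons]; simp

theorem join_nil_map_cons (c x : List Char) (mid : List (List Char)) :
    PySem.Chars.join [] (x :: mid.map (fun m => c ++ m)) = PySem.Chars.join c (x :: mid) := by
  induction mid generalizing x with
  | nil => rfl
  | cons m ms ih =>
    rw [List.map_cons, join_nil_cons, ih (c ++ m), join_sep_cons_sep,
      PySem.Chars.join_cons_cons, List.append_assoc]

-- join with empty separator peels off a last part.
theorem join_nil_cons_append_singleton (a : List Char) (l : List (List Char)) (t : List Char) :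
    PySem.Chars.join [] (a :: (l ++ [t])) = PySem.Chars.join [] (a :: l) ++ t := by
  rw [← List.cons_append, join_nil_append_singleton]

-- B's fold over the full enumeration, for a list with at least two elements.
theorem alt_parts (x y last_sep : String) (mid : List String) :
    list_as_text_alt (x :: mid ++ [y]) last_sep =
      PySem.Str.join "" ((x :: mid.map (fun m => ", " ++ m)) ++ [" " ++ last_sep ++ " " ++ y]) := by
  unfold list_as_text_alt
  rw [List.cons_append, PySem.List.enumerate_cons, PySem.List.enumerate_append]
  simp only [List.foldl_cons, List.foldl_append]
  have hn : ((x :: (mid ++ [y])).length : Int) = (mid.length : Int) + 2 := by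
    simp; omega
  rw [hn]
  simp only [reduceIte, List.nil_append]
  have hmid : (PySem.List.enumerate mid (0 + 1)).foldl
      (fun acc p =>
        if p.1 = 0 then acc ++ [p.2]
        else if p.1 = (mid.length : Int) + 2 - 1 then acc ++ [" " ++ last_sep ++ " " ++ p.2]
        else acc ++ [", " ++ p.2]) [x]
      = [x] ++ mid.map (fun m => ", " ++ m) := by
    rw [PySem.List.foldl_congr_mem _ _ (fun acc p => acc ++ [", " ++ p.2])]
    · rw [PySem.List.foldl_append_singleton_eq_map,
        show (fun p : Int × String => ", " ++ p.2)
          = ((fun m => ", " ++ m) ∘ (fun p : Int × String => p.2)) from rfl,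
        ← List.map_map, PySem.List.map_snd_enumerate]
    · intro acc p hp
      rw [PySem.List.mem_enumerate_iff] at hp
      obtain ⟨k, hk, rfl⟩ := hp
      rw [if_neg (by omega), if_neg (by omega)]
  rw [hmid]
  simp only [PySem.List.enumerate_cons, PySem.List.enumerate_nil, List.foldl_cons, List.foldl_nil]
  rw [if_neg (by omega), if_pos (by omega)]
  simp

theorem list_as_text_spec : Claim_equal_list_as_text := by
  intro items last_sep _
  unfold Spec_list_as_text
  match items with
  | [] => rfl
  | [x] =>
    simp only [list_as_text, list_as_text_alt]
    norm_num [PySem.List.enumerate_cons, PySem.List.enumerate_nil, PySem.List.pyGetD,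
      PySem.List.pyGet?, PySem.List.pyIdx?]
    rw [← String.toList_inj, PySem.Str.toList_join, List.map_cons, List.map_nil,
      PySem.Chars.join_singleton]
  | x :: m :: rest =>
    obtain ⟨mid, y, heq⟩ : ∃ mid y, m :: rest = mid ++ [y] :=
      ⟨(m :: rest).dropLast, (m :: rest).getLast (by simp),
        (List.dropLast_append_getLast (by simp)).symm⟩
    rw [heq, ← List.cons_append, alt_parts]
    unfold list_as_text
    rw [if_neg (by simp), if_neg (by simp)]
    rw [PySem.List.slice_to_neg_one,
      show (x :: mid ++ [y]).dropLast = x :: mid by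
        rw [show x :: mid ++ [y] = (x :: mid) ++ [y] from rfl, List.dropLast_concat],
      show PySem.List.pyGetD (x :: mid ++ [y]) (-1) "" = y from
        PySem.List.pyGetD_neg_one_append_singleton (x :: mid) y ""]
    rw [← String.toList_inj]
    simp only [PySem.Str.toList_join, String.toList_append, List.map_append, List.map_cons,
      List.map_nil, List.map_map, List.cons_append]
    rw [show String.toList "" = [] from rfl, join_nil_cons_append_singleton]
    have hmap : (List.map (String.toList ∘ fun m => ", " ++ m) mid) =
        (mid.map String.toList).map (fun cs => (", ").toList ++ cs) := by
      simp [Function.comp, String.toList_append]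
    rw [hmap, join_nil_map_cons]
    simp

-- ===== VERDICT (by name: the statement is the Claim_ definition above) =====
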